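-- pv_equiv track=rewrite | github.com/v0jt4s13/python-test | codeWars/row-columns-table.py | Urbid
-- ===== SOURCE A (Python) =====
-- def Urbid(n,m):
--
--   def tablica (n, m):
--     ret = []
--     nice_list = [(lambda x: str(x%10))(x) for x in list(range(0,n*m+1))]
--     start, end = 0, m
--
--     for _ in range(n):
--       ret.append(" ".join(nice_list[start:end]))
--       start, end = end, end+m
--
--     return "\n".join(ret)
--
--   return tablica(n,m)
-- ===== SOURCE B (Python) =====
-- def Urbid(n, m):
--     return "\n".join(" ".join(str((i * m + j) % 10) for j in range(m)) for i in range(n))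
-- ===== Notes on version B (the rewrite author's own statement) =====
-- stated objective: simpler
-- what changed: B drops A's precomputed flat list of n*m+1 digit strings and its slice/cursor loop; each cell is computed directly from its position as (i*m+j)%10 and the grid is built as one nested join.
import Mathlib
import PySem

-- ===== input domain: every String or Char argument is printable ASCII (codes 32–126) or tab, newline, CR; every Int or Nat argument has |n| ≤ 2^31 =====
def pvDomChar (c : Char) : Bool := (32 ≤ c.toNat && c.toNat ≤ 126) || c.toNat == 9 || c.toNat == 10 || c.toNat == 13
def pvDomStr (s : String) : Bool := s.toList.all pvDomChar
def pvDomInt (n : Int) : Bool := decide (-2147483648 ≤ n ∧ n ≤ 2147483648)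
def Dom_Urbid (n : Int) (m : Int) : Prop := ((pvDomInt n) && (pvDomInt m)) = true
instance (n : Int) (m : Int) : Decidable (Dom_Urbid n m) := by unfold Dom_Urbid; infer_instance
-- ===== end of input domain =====

-- B builds each cell directly from its position as (i*m+j)%10 with a nested join,
-- dropping A's precomputed flat digit list and its slice/cursor loop (objective: simpler).

-- ===== PORT A =====
-- literal port of A: flat list of str(x%10) for x in range(0, n*m+1), then a loop
-- over range(n) maintaining (ret, start, end) and appending joined slices.
def Urbid (n : Int) (m : Int) : String :=
  let niceList : List String :=
    (PySem.List.pyRange 0 (n * m + 1) 1).map (fun x => PySem.Int.toStr (PySem.Int.mod x 10))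
  let st :=
    (PySem.List.pyRange 0 n 1).foldl
      (fun (st : List String × Int × Int) _ =>
        (st.1 ++ [PySem.Str.join " " (PySem.List.slice niceList (some st.2.1) (some st.2.2))],
         st.2.2, st.2.2 + m))
      ([], 0, m)
  PySem.Str.join "\n" st.1

-- ===== PORT B =====
def Urbid_alt (n : Int) (m : Int) : String :=
  PySem.Str.join "\n"
    ((PySem.List.pyRange 0 n 1).map (fun i =>
      PySem.Str.join " "
        ((PySem.List.pyRange 0 m 1).map (fun j =>
          PySem.Int.toStr (PySem.Int.mod (i * m + j) 10)))))

-- ===== PRECONDITION & SPEC =====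
def Spec_Urbid (n : Int) (m : Int) (out : String) : Prop := out = Urbid_alt n m
instance (n : Int) (m : Int) (out : String) : Decidable (Spec_Urbid n m out) := by unfold Spec_Urbid; infer_instance

-- ===== CLAIM (what is proved, stated in full; the proofs are below) =====
def Claim_equal_Urbid : Prop := ∀ (n : Int) (m : Int), Dom_Urbid n m → Spec_Urbid n m (Urbid n m)

-- ===== LEMMAS AND PROOFS =====

-- A's loop over range(a, b) starting at cursor (a*m, a*m+m) appends, in order, the
-- joined slice [i*m : i*m+m] for each i, ending with cursor (b*m, b*m+m).
lemma urbid_loop (nice : List String) (m : Int) :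
    ∀ (k : Nat) (a : Int) (acc : List String),
      (PySem.List.pyRange a (a + k) 1).foldl
        (fun (st : List String × Int × Int) _ =>
          (st.1 ++ [PySem.Str.join " " (PySem.List.slice nice (some st.2.1) (some st.2.2))],
           st.2.2, st.2.2 + m))
        (acc, a * m, a * m + m)
      = (acc ++ (PySem.List.pyRange a (a + k) 1).map
            (fun i => PySem.Str.join " " (PySem.List.slice nice (some (i * m)) (some (i * m + m)))),
         (a + k) * m, (a + k) * m + m) := by
  intro k
  induction k with
  | zero =>
      intro a acc
      rw [PySem.List.pyRange_one_eq_nil (by push_cast; omega)]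
      simp
  | succ k ih =>
      intro a acc
      have hcons : PySem.List.pyRange a (a + (k+1 : Nat)) 1
          = a :: PySem.List.pyRange (a+1) (a + (k+1 : Nat)) 1 :=
        PySem.List.pyRange_one_cons (by push_cast; omega)
      rw [hcons]
      simp only [List.foldl_cons, List.map_cons]
      have h1 : a + ((k+1 : Nat) : Int) = (a + 1) + (k : Nat) := by push_cast; omega
      have h2 : a * m + m = (a + 1) * m := by ring
      rw [h1, h2]
      rw [ih]
      simp

-- slicing range(0, b) at nonnegative in-bounds positions gives the sub-range
lemma slice_pyRange (a c b : Int) (h0 : 0 ≤ a) (hac : a ≤ c) (hcb : c ≤ b) :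
    PySem.List.slice (PySem.List.pyRange 0 b 1) (some a) (some c) = PySem.List.pyRange a c 1 := by
  rw [PySem.List.slice_toNat _ h0 (le_trans h0 hac)]
  rw [PySem.List.pyRange_one_append 0 a b h0 (le_trans hac hcb),
      PySem.List.pyRange_one_append a c b hac hcb]
  have hlen1 : (PySem.List.pyRange 0 a 1).length = a.toNat := by
    rw [PySem.List.length_pyRange_one]; omega
  rw [← hlen1, List.drop_left, hlen1]
  have hlen2 : (PySem.List.pyRange a c 1).length = c.toNat - a.toNat := by
    rw [PySem.List.length_pyRange_one]; omega
  rw [← hlen2, List.take_left]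

-- every slice of the empty list is empty
lemma slice_nil (a b : Int) : PySem.List.slice ([] : List String) (some a) (some b) = [] := by
  simp [PySem.List.slice, PySem.List.clampIdx]

-- slice commutes with map (slice is clamped drop/take; map preserves length)
lemma slice_map_comm (f : Int → String) (xs : List Int) (a b : Int) :
    PySem.List.slice (xs.map f) (some a) (some b) = (PySem.List.slice xs (some a) (some b)).map f := by
  simp [PySem.List.slice, PySem.List.clampIdx, List.map_drop, List.map_take]

-- A's row i equals B's row i, for 0 ≤ i < n
lemma urbid_row (n m i : Int) (h0 : 0 ≤ i) (hin : i < n) :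
    PySem.Str.join " "
      (PySem.List.slice
        ((PySem.List.pyRange 0 (n * m + 1) 1).map (fun x => PySem.Int.toStr (PySem.Int.mod x 10)))
        (some (i * m)) (some (i * m + m)))
    = PySem.Str.join " "
        ((PySem.List.pyRange 0 m 1).map (fun j => PySem.Int.toStr (PySem.Int.mod (i * m + j) 10))) := by
  rcases le_or_gt m 0 with hm | hm
  · -- m ≤ 0 : both rows are empty joins
    rw [PySem.List.pyRange_one_eq_nil hm]
    rcases eq_or_lt_of_le hm with hm0 | hmneg
    · -- m = 0 : slice [0:0] of anything is []
      subst hm0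
      rw [show i * (0:Int) + 0 = i * 0 from by ring]
      rw [PySem.List.slice_toNat _ (by positivity) (by positivity)]
      simp
    · -- m < 0 : the flat list itself is empty (n ≥ 1 forces n*m+1 ≤ 0)
      have hnm : n * m + 1 ≤ 0 := by nlinarith
      rw [PySem.List.pyRange_one_eq_nil (by omega), List.map_nil, slice_nil]
      simp
  · -- 0 < m : slice = sub-range, then reindex
    have hsl : PySem.List.slice (PySem.List.pyRange 0 (n * m + 1) 1)
        (some (i * m)) (some (i * m + m)) = PySem.List.pyRange (i * m) (i * m + m) 1 :=
      slice_pyRange _ _ _ (by positivity) (by omega) (by nlinarith)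
    rw [slice_map_comm, hsl, PySem.List.pyRange_one (i*m) (i*m+m),
        PySem.List.pyRange_one 0 m]
    simp only [List.map_map]
    have h3 : i * m + m - i * m = m - 0 := by ring
    rw [h3]
    congr 1
    apply List.map_congr_left
    intro k _
    simp

-- ===== VERDICT (by name: the statement is the Claim_ definition above) =====
theorem Urbid_spec : Claim_equal_Urbid := by
  unfold Claim_equal_Urbid
  intro n m _
  unfold Spec_Urbid Urbid Urbid_alt
  rcases le_or_gt n 0 with hn | hn
  · rw [PySem.List.pyRange_one_eq_nil hn]
    simp
  · have hform : n = 0 + ((n.toNat : Nat) : Int) := by omega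
    have hinit : ((([] : List String), (0:Int), m)) = (([] : List String), (0:Int) * m, (0:Int) * m + m) := by
      norm_num
    rw [hform]
    dsimp only
    rw [hinit, urbid_loop]
    rw [← hform]
    congr 1
    simp only [List.nil_append]
    apply List.map_congr_left
    intro i hi
    rw [PySem.List.mem_pyRange_one] at hi
    exact urbid_row n m i hi.1 hi.2
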